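/- GENERATED by tools/from_farm_form.py from prooffarm-gif/accepted/DGifCloseFile.5/Proof.lean (a worked proof of the farm's unit `DGifCloseFile.5`,
   accepted by the verdict) — do not edit. -/
import Gif.Spec.Units.DGifCloseFile_5
import Gif.Spec.AllSegs
import Gif.Spec.Proved.DGifCloseFile_5_Lemmas

open X86 X86.User Asan ProgX.Base ProgX.Base.Spec Gif.Spec

/-!
  `DGifCloseFile.5` (0x109d13 … 0x109d7c and 0x109dc0 … 0x109dc8, 32 instructions; dgif_lib.c:708-735): THE TAIL OF `DGifCloseFile`:
  `Private = gif.Private`, the two dead tests (`FileState = 8`, `File = 0`), `free(Private)`, `free(GifFile)`, `*ErrorCode = 0` if the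
  pointer is not NULL, `return GIF_OK`. The two return addresses of `free` (0x109d4c `ret15`, 0x109d54 `ret16`) are made cuts of the
  unit's own, with the function's assertion `At` for the present heap; three walks (Lemmas.lean), chained here.
-/

/-- Segment 5 of `DGifCloseFile` takes `Closing` at 0x109d13 (forest `bare F`: gif and pv are all that is left) to `Returned`. -/
theorem Gif.Spec.Proved.DGifCloseFile_5_ok : Gif.Spec.DGifCloseFile_5.Statement := by
  intro Lay hLay μ hμ u₀ hcode h_load8 h_load4 h_free h_store4 H rest frames F R Hc e ret v hat
  -- 0x109d13 … `free(Private)` with the heap `Hc` … 0x109d4c (ret15)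
  have hfree1 := h_free Hc rest frames 24936
  refine (Gif.Spec.DGifCloseFile_5.cf5_seg_free_pv Lay hLay μ hμ u₀ hcode h_load8 h_load4 H rest frames F R Hc e ret
    hfree1 v hat).trans ?_
  intro v1 hv1
  obtain ⟨hat1, hcur1, hglive⟩ := hv1
  -- 0x109d4c … `free(GifFile)` with the heap `Hc.release F.pv` … 0x109d54 (ret16)
  have hfree2 := h_free (Hc.release F.pv) rest frames 120
  refine (Gif.Spec.DGifCloseFile_5.cf5_seg_free_gif Lay hLay μ hμ u₀ hcode H rest frames F R (Hc.release F.pv) e ret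
    hfree2 v1 hat1 hcur1 hglive).trans ?_
  intro v2 hv2
  obtain ⟨hat2, hcur2⟩ := hv2
  -- 0x109d54 … the `ret`, with the heap `(Hc.release F.pv).release F.gif`
  exact Gif.Spec.DGifCloseFile_5.cf5_seg_exit Lay hLay μ hμ u₀ hcode h_store4 H rest frames F R
    ((Hc.release F.pv).release F.gif) e ret v2 hat2 hcur2
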